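-- pv_equiv track=rewrite | github.com/MiroK/sl-pde | src/python/system_generation.py | multi_index
-- ===== SOURCE A (Python) =====
-- def multi_index(d, n):
--     '''Multi indices of size n in d vars'''
--     assert d > 0
--     assert n >= 0
--
--     if n == 0:
--         return [tuple(0 for _ in range(d))]
--     if d == 1:
--         return [(n, )]
--
--     return [(i, ) + index for i in range(n+1) for index in multi_index(d-1, n-i)]
-- ===== SOURCE B (Python) =====
-- def multi_index(d, n):
--     '''Multi indices of size n in d vars'''
--     assert d > 0
--     assert n >= 0
--
--     # Iterative work-list: extend every (prefix-chain, remaining-sum) pair by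
--     # one more variable per round; prefixes are shared cons-chains (value,
--     # parent) so each extension is O(1).  The last variable takes what's left.
--     parts = [(None, n)]
--     for _ in range(d - 1):
--         parts = [((i, chain), r - i) for (chain, r) in parts for i in range(r + 1)]
--     out = []
--     for chain, r in parts:
--         t = [r]
--         while chain is not None:
--             t.append(chain[0])
--             chain = chain[1]
--         t.reverse()
--         out.append(tuple(t))
--     return out
-- ===== Notes on version B (the rewrite author's own statement) =====
-- stated objective: alternative
-- what changed: Replaces the naive recursion on the number of variables by an iterative work-list loop over (shared prefix-chain, remaining-sum) pairs, extending every pair by one variable per round, with no recursion.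
import Mathlib
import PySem

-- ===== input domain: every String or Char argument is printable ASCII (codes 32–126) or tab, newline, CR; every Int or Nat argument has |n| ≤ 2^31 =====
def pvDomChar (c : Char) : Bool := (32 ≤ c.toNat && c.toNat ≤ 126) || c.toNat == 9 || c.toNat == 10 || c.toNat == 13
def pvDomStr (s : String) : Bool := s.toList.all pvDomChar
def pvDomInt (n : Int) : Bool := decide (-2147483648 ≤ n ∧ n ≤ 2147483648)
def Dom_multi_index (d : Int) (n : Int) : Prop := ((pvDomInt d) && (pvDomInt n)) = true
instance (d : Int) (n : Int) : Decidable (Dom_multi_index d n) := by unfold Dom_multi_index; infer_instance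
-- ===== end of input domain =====

-- B replaces A's naive recursion by an iterative work-list over variable positions (alternative decomposition, same cost).

-- ===== PORT A =====
-- Recursion of A on d, carried as a Nat (Python's asserts guarantee d > 0 on admitted
-- inputs; the d = 0 case is unreachable under Pre_).
def miA : Nat → Int → List (List Int)
  | d, n =>
    if n = 0 then [List.replicate d 0]
    else
      match d with
      | 0 => []
      | 1 => [[n]]
      | d' + 1 =>
        (PySem.List.pyRange 0 (n + 1) 1).flatMap
          (fun i => (miA d' (n - i)).map (fun idx => i :: idx))

def multi_index (d : Int) (n : Int) : List (List Int) := miA d.toNat n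

-- ===== PORT B =====
-- One round of B's loop body: extend each (chain, remaining) by one variable.
-- B's cons-chain `(i, chain)` / `None` is modelled as `i :: chain` / `[]`
-- (the chain holds the prefix in reverse, exactly as in Source B).
def miB_step (parts : List (List Int × Int)) : List (List Int × Int) :=
  parts.flatMap (fun pr =>
    (PySem.List.pyRange 0 (pr.2 + 1) 1).map (fun i => (i :: pr.1, pr.2 - i)))

-- Source B's final reconstruction: t = [r] ++ chain, then t.reverse()
def multi_index_alt (d : Int) (n : Int) : List (List Int) :=
  let parts := (List.range (d.toNat - 1)).foldl (fun ps _ => miB_step ps) [([], n)]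
  parts.map (fun pr => (pr.2 :: pr.1).reverse)

-- ===== PRECONDITION & SPEC =====
-- Pre_ is exactly A's two asserts: d > 0 and n ≥ 0.
def Pre_multi_index (d : Int) (n : Int) : Prop := 0 < d ∧ 0 ≤ n
instance (d : Int) (n : Int) : Decidable (Pre_multi_index d n) := by unfold Pre_multi_index; infer_instance

def pvWitness_multi_index : Int × Int := (3, 2)

def Spec_multi_index (d : Int) (n : Int) (out : List (List Int)) : Prop := out = multi_index_alt d n
instance (d : Int) (n : Int) (out : List (List Int)) : Decidable (Spec_multi_index d n out) := by unfold Spec_multi_index; infer_instance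

-- ===== CLAIM (what is proved, stated in full; the proofs are below) =====
def Claim_equal_multi_index : Prop := ∀ (d : Int) (n : Int), Dom_multi_index d n → Pre_multi_index d n → Spec_multi_index d n (multi_index d n)

-- ===== LEMMAS AND PROOFS =====

-- apply miB_step k times, head-first
def stepN : Nat → List (List Int × Int) → List (List Int × Int)
  | 0, ps => ps
  | k + 1, ps => stepN k (miB_step ps)

-- the fold in multi_index_alt only uses the length of the range
theorem foldl_step_eq_stepN (l : List Nat) (ps : List (List Int × Int)) :
    l.foldl (fun ps _ => miB_step ps) ps = stepN l.length ps := by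
  induction l generalizing ps with
  | nil => rfl
  | cons x xs ih => simp [stepN, ih]

theorem miA_one (r : Int) : miA 1 r = [[r]] := by
  by_cases h : r = 0
  · subst h; rfl
  · simp only [miA]; rw [if_neg h]

theorem miA_zero_n (d : Nat) : miA d 0 = [List.replicate d 0] := by
  cases d with
  | zero => rfl
  | succ e => rw [miA.eq_def]; simp

theorem flatMap_flatMap' {a b c : Type} (l : List a) (f : a → List b) (g : b → List c) :
    (l.flatMap f).flatMap g = l.flatMap (fun x => (f x).flatMap g) := by
  induction l <;> simp_all

theorem flatMap_map' {a b c : Type} (l : List a) (f : a → b) (g : b → List c) :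
    (l.map f).flatMap g = l.flatMap (fun x => g (f x)) := by
  induction l <;> simp_all

theorem map_flatMap' {a b c : Type} (l : List a) (f : a → List b) (g : b → c) :
    (l.flatMap f).map g = l.flatMap (fun x => (f x).map g) := by
  induction l <;> simp_all

theorem flatMap_singleton_map {a b : Type} (l : List a) (f : a → b) :
    l.flatMap (fun x => [f x]) = l.map f := by
  induction l <;> simp_all

theorem flatMap_congr' {a b : Type} (l : List a) (f g : a → List b)
    (h : ∀ x ∈ l, f x = g x) : l.flatMap f = l.flatMap g := by
  induction l with
  | nil => rfl
  | cons x xs ih =>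
    simp only [List.flatMap_cons]
    rw [h x (List.mem_cons_self), ih (fun y hy => h y (List.mem_cons_of_mem _ hy))]

-- uniform recurrence of A for at least two variables (holds for every integer r)
theorem miA_rec (d' : Nat) (hd : 1 ≤ d') (r : Int) :
    miA (d' + 1) r =
      (PySem.List.pyRange 0 (r + 1) 1).flatMap
        (fun i => (miA d' (r - i)).map (fun idx => i :: idx)) := by
  match d', hd with
  | e + 1, _ =>
    by_cases h : r = 0
    · subst h
      have h01 : PySem.List.pyRange 0 ((0 : Int) + 1) 1 = [0] := by decide
      rw [h01]
      simp [miA_zero_n, List.replicate_succ]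
    · rw [miA.eq_def]; dsimp only; rw [if_neg h]; rfl

-- main invariant: expanding the work-list after k rounds is A's enumeration with prefixes
theorem stepN_expand (k : Nat) (parts : List (List Int × Int)) :
    (stepN k parts).map (fun pr => (pr.2 :: pr.1).reverse) =
      parts.flatMap (fun pr => (miA (k + 1) pr.2).map (fun t => pr.1.reverse ++ t)) := by
  induction k generalizing parts with
  | zero =>
    show parts.map _ = _
    have h1 : parts.flatMap (fun pr => (miA 1 pr.2).map (fun t => pr.1.reverse ++ t)) =
        parts.map (fun pr => (pr.2 :: pr.1).reverse) := by
      rw [flatMap_congr' parts _ (fun pr => [(pr.2 :: pr.1).reverse])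
            (by intro pr _; rw [miA_one]; simp),
          flatMap_singleton_map]
    exact h1.symm
  | succ k ih =>
    show (stepN k (miB_step parts)).map _ = _
    rw [ih]
    simp only [miB_step]
    rw [flatMap_flatMap']
    refine flatMap_congr' _ _ _ ?_
    intro pr _
    rw [flatMap_map', miA_rec (k + 1) (by omega) pr.2, map_flatMap']
    refine flatMap_congr' _ _ _ ?_
    intro i _
    rw [List.map_map]
    refine List.map_congr_left ?_
    intro t _
    simp

-- ===== VERDICT (by name: the statement is the Claim_ definition above) =====
theorem multi_index_spec : Claim_equal_multi_index := by
  intro d n _ hpre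
  obtain ⟨hd, hn⟩ := hpre
  show multi_index d n = multi_index_alt d n
  unfold multi_index multi_index_alt
  rw [foldl_step_eq_stepN, List.length_range, stepN_expand]
  have hd1 : d.toNat - 1 + 1 = d.toNat := by omega
  rw [hd1]
  simp only [List.flatMap_cons, List.flatMap_nil, List.append_nil, List.nil_append,
    List.reverse_nil, List.map_id']
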